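-- pv_equiv track=rewrite | github.com/landturtler/2020_Algorithm | python/boj/1062/1062.py | solution
-- ===== SOURCE A (Python) =====
-- from string import ascii_lowercase
-- from itertools import combinations
--
-- def solution(N,K,words):
-- 	answer = 0
-- 	if K < 5:	 #anta, tica를 읽을 수 없음
-- 		return 0
--
-- #	alpha = list( chr(x) for x in range(97,97+26))
-- 	alpha = list(ascii_lowercase)
-- 	alpha.remove('a')
-- 	alpha.remove('c')
-- 	alpha.remove('i')
-- 	alpha.remove('n')
-- 	alpha.remove('t')
--
-- 	#a,c,i,n,t는 무조건 읽어야 하는 문자이므로 word에서 해당 글자 삭제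
--
-- 	for comb in combinations(alpha,K-5):
-- 		comb = list(comb)
-- 		cnt = 0
--
-- 		for word in words:
-- 			is_poss = True
--
-- 			for x in word:
-- 				if x not in comb:
-- 					is_poss = False
-- 					break
-- 			if is_poss == True:
-- 				cnt += 1
-- 		answer = max(answer, cnt)
--
-- 	return answer
-- ===== SOURCE B (Python) =====
-- # Different algorithm: recursive include/exclude search over the 21 candidate letters.
-- # Words are pre-filtered once, and on every "exclude letter" branch the word list is
-- # narrowed to words not containing that letter, so leaves just take its length.
-- def solution(N, K, words):
--     if K < 5:
--         return 0
--     letters = [c for c in "abcdefghijklmnopqrstuvwxyz" if c not in "acint"]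
--     ws = [w for w in words if all(ch in letters for ch in w)]
--
--     def dfs(letters, need, ws):
--         if need > len(letters):
--             return 0
--         if need == 0:
--             for c in letters:
--                 ws = [w for w in ws if c not in w]
--             return len(ws)
--         c, rest = letters[0], letters[1:]
--         keep = dfs(rest, need - 1, ws)
--         drop = dfs(rest, need, [w for w in ws if c not in w])
--         return max(keep, drop)
--
--     return dfs(letters, K - 5, ws)
-- ===== Notes on version B (the rewrite author's own statement) =====
-- stated objective: alternative
-- what changed: B replaces A's enumeration of all letter combinations with per-word character rescans by a recursive include/exclude search over the 21 candidate letters that pre-filters the words once and narrows the word list on every exclude branch, so each leaf just takes the length of the remaining list.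
import Mathlib
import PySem

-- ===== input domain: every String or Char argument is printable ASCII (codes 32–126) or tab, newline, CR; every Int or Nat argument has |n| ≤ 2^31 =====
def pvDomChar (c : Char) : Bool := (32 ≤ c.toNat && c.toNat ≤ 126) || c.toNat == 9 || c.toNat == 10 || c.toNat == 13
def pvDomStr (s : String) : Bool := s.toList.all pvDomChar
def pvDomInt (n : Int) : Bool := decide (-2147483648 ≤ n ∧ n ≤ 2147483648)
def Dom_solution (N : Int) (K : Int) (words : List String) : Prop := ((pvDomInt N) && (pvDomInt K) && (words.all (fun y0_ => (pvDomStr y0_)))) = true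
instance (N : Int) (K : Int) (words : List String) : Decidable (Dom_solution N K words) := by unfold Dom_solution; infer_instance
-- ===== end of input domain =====

-- B replaces A's combination enumeration + per-character rescans by a recursive
-- include/exclude search over the 21 letters that narrows the word list on every
-- "exclude" branch, so leaves just take a length (alternative decomposition).

-- ===== PORT A =====
-- itertools.combinations over a list (lexicographic by position), exact
def combos : Nat → List Char → List (List Char)
  | 0, _ => [[]]
  | _+1, [] => []
  | r+1, x::xs => (combos r xs).map (x :: ·) ++ combos (r+1) xs
termination_by r l => l.length

-- alpha.remove('a') … : each letter occurs once, so list.remove = List.erase (exact here)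
def solution (N : Int) (K : Int) (words : List String) : Int :=
  if K < 5 then 0
  else
    let alpha := ((((("abcdefghijklmnopqrstuvwxyz".toList).erase 'a').erase 'c').erase 'i').erase 'n').erase 't'
    (combos (K - 5).toNat alpha).foldl
      (fun answer comb =>
        let cnt : Int := words.foldl
          (fun cnt word =>
            -- 'for x in word: if x not in comb: is_poss = False; break' then 'if is_poss'
            if word.toList.all (fun x => comb.contains x) then cnt + 1 else cnt) 0
        max answer cnt) 0

-- ===== PORT B =====
-- the inner recursive dfs of Source B
def dfs (letters : List Char) (need : Nat) (ws : List String) : Int :=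
  if letters.length < need then 0
  else if need = 0 then
    -- 'for c in letters: ws = [w for w in ws if c not in w]; return len(ws)'
    ((letters.foldl (fun acc c => acc.filter (fun w => !(w.toList.contains c))) ws).length : Int)
  else
    match letters with
    | [] => 0  -- unreachable: need = 0 was handled above and need ≤ letters.length
    | c :: rest =>
      max (dfs rest (need - 1) ws)
          (dfs rest need (ws.filter (fun w => !(w.toList.contains c))))
termination_by letters.length
decreasing_by all_goals simp_all

def solution_alt (N : Int) (K : Int) (words : List String) : Int :=
  if K < 5 then 0
  else
    let letters := ("abcdefghijklmnopqrstuvwxyz".toList).filter (fun c => !("acint".toList.contains c))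
    let ws := words.filter (fun w => w.toList.all (fun ch => letters.contains ch))
    dfs letters (K - 5).toNat ws

-- ===== PRECONDITION & SPEC =====
def Spec_solution (N : Int) (K : Int) (words : List String) (out : Int) : Prop := out = solution_alt N K words
instance (N : Int) (K : Int) (words : List String) (out : Int) : Decidable (Spec_solution N K words out) := by unfold Spec_solution; infer_instance

-- ===== CLAIM (what is proved, stated in full; the proofs are below) =====
def Claim_equal_solution : Prop := ∀ (N : Int) (K : Int) (words : List String), Dom_solution N K words → Spec_solution N K words (solution N K words)

-- ===== LEMMAS AND PROOFS =====

-- word passes at a leaf of dfs: no letter of `letters` outside `comb` occurs in it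
def leafOk (letters comb : List Char) (w : String) : Bool :=
  letters.all (fun c => comb.contains c || !(w.toList.contains c))

lemma all_congr' {A : Type} (p q : A → Bool) : ∀ (l : List A), (∀ x ∈ l, p x = q x) → l.all p = l.all q := by
  intro l h
  induction l with
  | nil => rfl
  | cons a as ih =>
    simp only [List.all_cons, h a List.mem_cons_self,
      ih (fun x hx => h x (List.mem_cons_of_mem _ hx))]

-- choosing c: a leaf over (c :: rest) with c in the combination = a leaf over rest
lemma leafOk_keep (c : Char) (rest comb : List Char) (hc : c ∉ rest) (w : String) :
    leafOk (c :: rest) (c :: comb) w = leafOk rest comb w := by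
  simp only [leafOk, List.all_cons, List.contains_cons, BEq.rfl, Bool.true_or, Bool.true_and]
  apply all_congr'
  intro d hd
  have hdc : (d == c) = false := beq_eq_false_iff_ne.mpr (fun e => hc (e ▸ hd))
  simp [hdc]

-- excluding c: a leaf over (c :: rest) with c not in the combination also rejects words with c
lemma leafOk_drop (c : Char) (rest comb : List Char) (hcnot : comb.contains c = false) (w : String) :
    leafOk (c :: rest) comb w = (leafOk rest comb w && !(w.toList.contains c)) := by
  simp only [leafOk, List.all_cons, hcnot, Bool.false_or]
  exact Bool.and_comm _ _

-- A's per-word test = B's leaf test conjoined with B's pre-filter, for comb ⊆ L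
lemma word_test (L comb : List Char) (hsub : ∀ x ∈ comb, x ∈ L) (w : String) :
    (w.toList.all (fun x => comb.contains x))
      = (leafOk L comb w && w.toList.all (fun x => L.contains x)) := by
  rw [Bool.eq_iff_iff]
  simp only [List.all_eq_true, List.contains_eq_mem, Bool.and_eq_true, leafOk, Bool.or_eq_true,
    Bool.not_eq_true', decide_eq_true_eq, decide_eq_false_iff_not]
  constructor
  · intro h
    refine ⟨fun c hcL => ?_, fun x hx => hsub x (h x hx)⟩
    by_cases hcin : c ∈ comb
    · exact Or.inl hcin
    · exact Or.inr (fun hcw => hcin (h c hcw))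
  · rintro ⟨h1, h2⟩ x hx
    rcases h1 x (h2 x hx) with h | h
    · exact h
    · exact absurd hx h

lemma mem_combos : ∀ (r : Nat) (l : List Char) (c : List Char), c ∈ combos r l → ∀ x ∈ c, x ∈ l := by
  intro r l
  induction l generalizing r with
  | nil =>
    intro c hc x hx
    cases r with
    | zero => simp [combos] at hc; simp [hc] at hx
    | succ r => simp [combos] at hc
  | cons a as ih =>
    intro c hc x hx
    cases r with
    | zero => simp [combos] at hc; simp [hc] at hx
    | succ r =>
      simp only [combos, List.mem_append, List.mem_map] at hc
      rcases hc with ⟨d, hd, rfl⟩ | h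
      · rcases List.mem_cons.mp hx with rfl | hx
        · exact List.mem_cons_self
        · exact List.mem_cons_of_mem _ (ih r d hd x hx)
      · exact List.mem_cons_of_mem _ (ih (r+1) c h x hx)

lemma combos_eq_nil : ∀ (r : Nat) (l : List Char), l.length < r → combos r l = [] := by
  intro r l
  induction l generalizing r with
  | nil => intro h; cases r with
    | zero => omega
    | succ r => simp [combos]
  | cons a as ih =>
    intro h
    cases r with
    | zero => omega
    | succ r =>
      simp only [combos, List.append_eq_nil_iff, List.map_eq_nil_iff]
      exact ⟨ih r (by simp at h; omega), ih (r+1) (by simp at h; omega)⟩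

-- counting loop of A = countP
lemma foldl_count (p : String → Bool) (ws : List String) :
    ∀ c : Int, ws.foldl (fun cnt w => if p w then cnt + 1 else cnt) c = c + (ws.countP p : Int) := by
  induction ws with
  | nil => intro c; simp
  | cons w ws ih =>
    intro c
    by_cases h : p w <;> simp [h, ih] <;> ring

lemma foldl_max_congr (f g : List Char → Int) :
    ∀ (l : List (List Char)) (acc : Int), (∀ c ∈ l, f c = g c) →
      l.foldl (fun a c => max a (f c)) acc = l.foldl (fun a c => max a (g c)) acc := by
  intro l
  induction l with
  | nil => intro acc _; rfl
  | cons c cs ih =>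
    intro acc h
    simp only [List.foldl_cons, h c List.mem_cons_self]
    exact ih _ (fun d hd => h d (List.mem_cons_of_mem _ hd))

lemma foldl_max_nonneg (g : List Char → Int) :
    ∀ (l : List (List Char)) (a : Int), 0 ≤ a → 0 ≤ l.foldl (fun x c => max x (g c)) a := by
  intro l
  induction l with
  | nil => intro a h; exact h
  | cons c cs ih => intro a h; exact ih _ (le_trans h (le_max_left _ _))

lemma foldl_max_pull (g : List Char → Int) :
    ∀ (l : List (List Char)) (a : Int), 0 ≤ a →
      l.foldl (fun x c => max x (g c)) a = max a (l.foldl (fun x c => max x (g c)) 0) := by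
  intro l
  induction l with
  | nil => intro a h; simp [max_eq_left h]
  | cons c cs ih =>
    intro a h
    simp only [List.foldl_cons]
    rw [ih _ (le_trans h (le_max_left _ _)), ih (max 0 (g c)) (le_max_left _ _), ← max_assoc, ← max_assoc]
    congr 1
    omega

-- dfs's sequential filtering = one filter by "contains none of letters"
lemma foldl_filter_eq : ∀ (letters : List Char) (ws : List String),
    letters.foldl (fun acc c => acc.filter (fun w => !(w.toList.contains c))) ws
      = ws.filter (fun w => letters.all (fun c => !(w.toList.contains c))) := by
  intro letters
  induction letters with
  | nil => intro ws; simp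
  | cons c rest ih =>
    intro ws
    simp only [List.foldl_cons, ih, List.filter_filter]
    refine List.filter_congr fun w _ => ?_
    simp [Bool.and_comm]

-- the core: dfs = max over combinations of the leaf count
lemma dfs_eq : ∀ (letters : List Char) (need : Nat) (ws : List String), letters.Nodup →
    dfs letters need ws =
      (combos need letters).foldl (fun a comb => max a ((ws.countP (leafOk letters comb)) : Int)) 0 := by
  intro letters
  induction letters with
  | nil =>
    intro need ws _
    cases need with
    | zero =>
      rw [dfs]
      simp only [combos, List.foldl_cons, List.foldl_nil, reduceIte]
      rw [show leafOk ([] : List Char) [] = fun _ => true by funext w; rfl, List.countP_true]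
      simp
    | succ r =>
      rw [dfs]
      simp [combos]
  | cons c rest ih =>
    intro need ws hnd
    have hc : c ∉ rest := (List.nodup_cons.mp hnd).1
    have hrest : rest.Nodup := (List.nodup_cons.mp hnd).2
    cases need with
    | zero =>
      rw [dfs]
      simp only [Nat.not_lt_zero, if_false, reduceIte]
      rw [foldl_filter_eq]
      simp only [combos, List.foldl_cons, List.foldl_nil]
      rw [List.countP_eq_length_filter]
      have hpe : leafOk (c :: rest) [] = fun w => (c :: rest).all (fun d => !(w.toList.contains d)) := by
        funext w; simp [leafOk]
      rw [hpe, max_eq_right (Int.natCast_nonneg _)]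
    | succ r =>
      by_cases hlen : (c :: rest).length < r + 1
      · rw [dfs, if_pos hlen]
        have h1 : combos r rest = [] := combos_eq_nil _ _ (by simp at hlen; omega)
        have h2 : combos (r+1) rest = [] := combos_eq_nil _ _ (by simp at hlen; omega)
        simp [combos, h1, h2]
      · rw [dfs, if_neg hlen, if_neg (Nat.succ_ne_zero r)]
        simp only [Nat.add_sub_cancel]
        simp only [combos, List.foldl_append, List.foldl_map]
        -- keep branch: combinations containing c
        have hkeep : (combos r rest).foldl
            (fun a comb => max a ((ws.countP (leafOk (c :: rest) (c :: comb))) : Int)) 0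
            = dfs rest r ws := by
          rw [ih r ws hrest]
          apply foldl_max_congr
          intro comb hcomb
          congr 1
          exact List.countP_congr fun w _ => by rw [leafOk_keep c rest comb hc w]
        -- drop branch: combinations avoiding c, over the narrowed word list
        have hdrop : (combos (r+1) rest).foldl
            (fun a comb => max a ((ws.countP (leafOk (c :: rest) comb)) : Int)) 0
            = dfs rest (r+1) (ws.filter (fun w => !(w.toList.contains c))) := by
          rw [ih (r+1) _ hrest]
          apply foldl_max_congr
          intro comb hcomb
          congr 1
          have hcnot : comb.contains c = false := by
            simp only [List.contains_eq_mem, decide_eq_false_iff_not]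
            intro hmem
            exact hc (mem_combos _ _ _ hcomb c hmem)
          rw [List.countP_filter]
          exact List.countP_congr fun w _ => by rw [leafOk_drop c rest comb hcnot w]
        rw [foldl_max_pull _ _ _ (foldl_max_nonneg _ _ _ le_rfl), hkeep, hdrop]

set_option maxRecDepth 4096 in
lemma letters_eq :
    ((((("abcdefghijklmnopqrstuvwxyz".toList).erase 'a').erase 'c').erase 'i').erase 'n').erase 't'
      = ("abcdefghijklmnopqrstuvwxyz".toList).filter (fun c => !("acint".toList.contains c)) := by
  decide

set_option maxRecDepth 4096 in
lemma letters_nodup :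
    (("abcdefghijklmnopqrstuvwxyz".toList).filter (fun c => !("acint".toList.contains c))).Nodup := by
  decide

theorem solution_spec : Claim_equal_solution := by
  intro N K words _
  unfold Spec_solution solution solution_alt
  by_cases h5 : K < 5
  · simp only [if_pos h5]
  · simp only [if_neg h5]
    rw [letters_eq]
    set L := ("abcdefghijklmnopqrstuvwxyz".toList).filter (fun c => !("acint".toList.contains c)) with hLdef
    set ws := words.filter (fun w => w.toList.all (fun ch => L.contains ch)) with hws
    rw [dfs_eq L _ ws letters_nodup]
    apply foldl_max_congr
    intro comb hcomb
    have hsub : ∀ x ∈ comb, x ∈ L := mem_combos _ _ _ hcomb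
    rw [foldl_count, zero_add]
    congr 1
    -- count over all words of "chars ⊆ comb" = count over prefiltered ws of leafOk
    rw [hws, List.countP_filter]
    exact List.countP_congr fun w _ => by rw [word_test L comb hsub w]
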